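-- pv_equiv track=rewrite | github.com/blasfir/srom-3 | tttttt.py | galueMultiply
-- ===== SOURCE A (Python) =====
-- def make_eq(A, B):
--     if len(A) < len(B):
--         A = [0] * (len(B) - len(A)) + A
--     if len(A) > len(B):
--         B = [0] * (len(A) - len(B)) + B
--     return A, B
--
-- def deleteExtraZeros(A):
--     while A and A[0] == 0:
--         A.pop(0)
--     if not A:
--         return [0]
--     return A
--
-- def galueModule(A, N):
--     A = deleteExtraZeros(A)
--     N = deleteExtraZeros(N)
--     if len(A) < len(N):
--         return A
--
--     shift = len(A) - len(N)
--     N_shifted = N + [0] * shift  # зсуваємо N вправо до ступеня A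
--
--     A, N_shifted = make_eq(A, N_shifted)
--     for i in range(len(A)):
--         A[i] = (A[i] + N_shifted[i]) % 2
--
--     A = deleteExtraZeros(A)
--     return galueModule(A, N)
--
-- def galueMultiply(A, B, N):
--     A = deleteExtraZeros(A)
--     B = deleteExtraZeros(B)
--     A, B = make_eq(A, B)
--     result = [0] * (len(A) * 2 - 1)
--     for i in range(len(A)):
--         if A[i] == 1:
--             for j in range(len(B)):
--                 result[i+j] = (result[i+j] + B[j]) % 2
--     result = galueModule(result, N)
--     return deleteExtraZeros(result)
-- ===== SOURCE B (Python) =====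
-- def galueMultiply(A, B, N):
--     # pack the coefficient lists into machine integers (MSB first): an entry of A
--     # contributes only when it is exactly 1 (that is A's test), entries of B and N
--     # count by parity; then carry-less multiply by shift/XOR and reduce by aligned
--     # XORs driven by bit_length, and unpack back to a list
--     a = 0
--     for x in A:
--         a = (a << 1) | (1 if x == 1 else 0)
--     b = 0
--     for x in B:
--         b = (b << 1) | (x & 1)
--     n = 0
--     for x in N:
--         n = (n << 1) | (x & 1)
--     p = 0
--     while a:
--         if a & 1:
--             p ^= b
--         a >>= 1
--         b <<= 1
--     dn = n.bit_length()
--     while n and p.bit_length() >= dn: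
--         p ^= n << (p.bit_length() - dn)
--     if p == 0:
--         return [0]
--     return [(p >> k) & 1 for k in range(p.bit_length() - 1, -1, -1)]
-- ===== Notes on version B (the rewrite author's own statement) =====
-- stated objective: faster
-- what changed: B packs the coefficient lists into arbitrary-precision integers (reading A's entries as '== 1' and B's/N's by parity, exactly as A does) and performs the GF(2) multiply as a shift/XOR loop and the modular reduction as aligned XORs driven by bit_length, replacing A's element-wise list convolution and its recursive list-based reduction with padding and zipping.
-- outside the precondition, e.g. on galueMultiply([1], [1], [2, 1]): A returns [1], B returns [0]; on galueMultiply([1], [1], [1]): A raises RecursionError, B returns [0]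
import Mathlib
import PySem

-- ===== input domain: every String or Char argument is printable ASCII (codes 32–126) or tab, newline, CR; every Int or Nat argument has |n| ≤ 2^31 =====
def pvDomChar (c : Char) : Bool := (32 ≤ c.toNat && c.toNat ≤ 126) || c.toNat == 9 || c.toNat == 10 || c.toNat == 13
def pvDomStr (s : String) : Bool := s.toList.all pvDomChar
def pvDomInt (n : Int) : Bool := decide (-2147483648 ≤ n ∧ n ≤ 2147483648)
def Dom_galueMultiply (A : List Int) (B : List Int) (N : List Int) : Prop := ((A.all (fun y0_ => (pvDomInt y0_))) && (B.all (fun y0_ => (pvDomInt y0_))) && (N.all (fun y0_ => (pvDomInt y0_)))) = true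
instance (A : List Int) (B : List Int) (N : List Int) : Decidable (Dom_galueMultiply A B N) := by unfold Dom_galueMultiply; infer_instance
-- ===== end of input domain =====

-- B packs the coefficient lists into machine integers (reading A's entries as 'is exactly 1' and
-- B's/N's by parity, exactly as A does) and multiplies/reduces by shift/XOR (objective: faster,
-- large constant-factor win from word-parallel bit operations).
-- Note: Python A strips leading zeros of its list arguments IN PLACE (deleteExtraZeros pops); the
-- equivalence proved here is about the return value only.


-- ===== PORT A =====
-- deleteExtraZeros: the while-pop loop becomes structural recursion
def delz : List Int → List Int
  | [] => [0]
  | x :: xs => if x = 0 then delz xs else x :: xs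

def makeEq (A B : List Int) : List Int × List Int :=
  let A' := if A.length < B.length then List.replicate (B.length - A.length) 0 ++ A else A
  let B' := if A'.length > B.length then List.replicate (A'.length - B.length) 0 ++ B else B
  (A', B')

-- galueModule: Python's recursion can diverge (e.g. when the stripped N is [0] or [1]), so the
-- port takes fuel; fuel A.length+1 is enough on every input Pre_ admits (each recursive step
-- strictly shortens the stripped A), so inside Pre_ this computes exactly what Python computes.
def galueModuleF : Nat → List Int → List Int → List Int
  | 0, A, _ => A
  | fuel+1, A0, N0 =>
    let A := delz A0
    let N := delz N0
    if A.length < N.length then A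
    else
      let shift := A.length - N.length
      let Nsh := N ++ List.replicate shift 0
      let p := makeEq A Nsh
      let A2 := List.zipWith (fun a n => PySem.Int.mod (a + n) 2) p.1 p.2
      galueModuleF fuel (delz A2) N

def galueModule (A N : List Int) : List Int := galueModuleF (A.length + 1) A N

-- the inner 'for j' loop: list indexing/assignment is in range here, so getD/set are exact
def innerLoop (B : List Int) (i : Nat) (res : List Int) : List Int :=
  (List.range B.length).foldl
    (fun r j => r.set (i+j) (PySem.Int.mod (r.getD (i+j) 0 + B.getD j 0) 2)) res

def galueMultiply (A B N : List Int) : List Int :=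
  let A1 := delz A
  let B1 := delz B
  let p := makeEq A1 B1
  let result := List.replicate (2 * p.1.length - 1) 0
  let result := (List.range p.1.length).foldl
    (fun r i => if p.1.getD i 0 = 1 then innerLoop p.2 i r else r) result
  delz (galueModule result N)

-- ===== PORT B =====
-- all packed values are nonnegative, so Nat models Python's int exactly here;
-- (v << 1) | bit, x & 1, a >> 1, p ^ b, bit_length are <<<, PySem.Int.band, >>>, ^^^, PySem.Int.bitLength
def packA (L : List Int) : Nat := L.foldl (fun v x => (v <<< 1) ||| (if x = 1 then 1 else 0)) 0

def packB (L : List Int) : Nat := L.foldl (fun v x => (v <<< 1) ||| (PySem.Int.band x 1).toNat) 0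

def mulLoopB (a b p : Nat) : Nat :=
  if a = 0 then p else mulLoopB (a >>> 1) (b <<< 1) (if a &&& 1 = 1 then p ^^^ b else p)
termination_by a
decreasing_by simpa [Nat.shiftRight_succ] using Nat.div_lt_self (Nat.pos_of_ne_zero ‹a ≠ 0›) one_lt_two

def blen (p : Nat) : Nat := PySem.Int.bitLength (p : Int)

-- the reduction while-loop; the port takes fuel: blen p + 1 suffices whenever n ≠ 0
-- (each pass strictly shrinks p's bit length), and for n = 0 the loop does not run at all
def redLoopB : Nat → Nat → Nat → Nat
  | 0, p, _ => p
  | f+1, p, n => if n ≠ 0 ∧ blen n ≤ blen p then redLoopB f (p ^^^ (n <<< (blen p - blen n))) n else p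

def galueMultiply_alt (A B N : List Int) : List Int :=
  let a := packA A
  let b := packB B
  let n := packB N
  let p := mulLoopB a b 0
  let q := redLoopB (blen p + 1) p n
  if q = 0 then [0]
  -- range(bl-1, -1, -1) enumerates k = bl-1 … 0
  else (List.range (blen q)).reverse.map (fun k => (((q >>> k) &&& 1 : Nat) : Int))

-- ===== PRECONDITION & SPEC =====
-- Pre_ requires the modulus N, after stripping leading zero entries, to keep length ≥ 2 and
-- either to have an odd leading coefficient or the product to be trivially zero (no entry of A
-- is exactly 1, or every entry of B is even): otherwise A's recursive reduction never shortens
-- its argument and A raises RecursionError whenever the reduction is reached (it returns only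
-- accidentally, when the product polynomial happens to be shorter than the stripped N — cited).
def Pre_galueMultiply (A : List Int) (B : List Int) (N : List Int) : Prop :=
  2 ≤ (N.dropWhile (fun x => x == 0)).length ∧
  (PySem.Int.mod ((N.dropWhile (fun x => x == 0)).headD 0) 2 = 1 ∨
   (∀ x ∈ A, x ≠ 1) ∨ (∀ x ∈ B, PySem.Int.mod x 2 = 0))
instance (A : List Int) (B : List Int) (N : List Int) : Decidable (Pre_galueMultiply A B N) := by
  unfold Pre_galueMultiply; infer_instance

def pvWitness_galueMultiply : List Int × List Int × List Int := ([1,0,1], [1,1], [1,0,1,1])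

def Spec_galueMultiply (A : List Int) (B : List Int) (N : List Int) (out : List Int) : Prop := out = galueMultiply_alt A B N
instance (A : List Int) (B : List Int) (N : List Int) (out : List Int) : Decidable (Spec_galueMultiply A B N out) := by unfold Spec_galueMultiply; infer_instance

-- ===== CLAIM (what is proved, stated in full; the proofs are below) =====
def Claim_equal_galueMultiply : Prop := ∀ (A : List Int) (B : List Int) (N : List Int), Dom_galueMultiply A B N → Pre_galueMultiply A B N → Spec_galueMultiply A B N (galueMultiply A B N)

-- ===== LEMMAS AND PROOFS =====
-- base valuations
def bitv (x : Int) : Nat := if x = 1 then 1 else 0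
def bitp (x : Int) : Nat := (PySem.Int.mod x 2).toNat
def valF (f : Int → Nat) (L : List Int) : Nat := L.foldl (fun v x => 2*v + f x) 0
def val (L : List Int) : Nat := valF bitv L
def valp (L : List Int) : Nat := valF bitp L
def Bits (L : List Int) : Prop := ∀ x ∈ L, x = 0 ∨ x = 1

theorem bitv_le_one (x : Int) : bitv x ≤ 1 := by unfold bitv; split <;> simp
theorem bitp_le_one (x : Int) : bitp x ≤ 1 := by
  unfold bitp
  have h1 := PySem.Int.mod_nonneg x (b := 2) (by norm_num)
  have h2 := PySem.Int.mod_lt x (b := 2) (by norm_num)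
  omega

theorem vF_accum (f : Int → Nat) (L : List Int) (v : Nat) :
    L.foldl (fun v x => 2*v + f x) v = v * 2 ^ L.length + valF f L := by
  induction L generalizing v with
  | nil => simp [valF]
  | cons x xs ih =>
    simp only [List.foldl_cons, List.length_cons, valF]
    rw [ih (2*v + f x), ih (2*0 + f x)]
    ring

theorem vF_cons (f : Int → Nat) (x : Int) (xs : List Int) :
    valF f (x :: xs) = f x * 2 ^ xs.length + valF f xs := by
  show List.foldl _ _ _ = _
  rw [List.foldl_cons, vF_accum]; ring_nf

theorem vF_append (f : Int → Nat) (X Y : List Int) :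
    valF f (X ++ Y) = valF f X * 2 ^ Y.length + valF f Y := by
  show List.foldl _ _ _ = _
  rw [List.foldl_append, vF_accum]
  rfl

theorem vF_lt (f : Int → Nat) (hf : ∀ x, f x ≤ 1) (L : List Int) : valF f L < 2 ^ L.length := by
  induction L with
  | nil => simp [valF]
  | cons x xs ih =>
    rw [vF_cons]
    have : f x * 2 ^ xs.length ≤ 2 ^ xs.length := by
      calc f x * 2 ^ xs.length ≤ 1 * 2 ^ xs.length := Nat.mul_le_mul_right _ (hf x)
        _ = 2 ^ xs.length := by ring
    simp only [List.length_cons, pow_succ]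
    omega

theorem vF_replicate_zero (f : Int → Nat) (hf0 : f 0 = 0) (s : Nat) :
    valF f (List.replicate s 0) = 0 := by
  induction s with
  | zero => rfl
  | succ n ih => rw [List.replicate_succ, vF_cons, ih, hf0]; simp

theorem vF_pad (f : Int → Nat) (hf0 : f 0 = 0) (s : Nat) (L : List Int) :
    valF f (List.replicate s 0 ++ L) = valF f L := by
  rw [vF_append, vF_replicate_zero f hf0]; ring

theorem vF_single (f : Int → Nat) (b : Int) : valF f [b] = f b := by
  rw [vF_cons]; simp [valF]

-- val/valp specialisations used below
theorem val_cons (x : Int) (xs : List Int) : val (x :: xs) = bitv x * 2 ^ xs.length + val xs :=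
  vF_cons bitv x xs
theorem val_append (X Y : List Int) : val (X ++ Y) = val X * 2 ^ Y.length + val Y :=
  vF_append bitv X Y
theorem val_lt (L : List Int) : val L < 2 ^ L.length := vF_lt bitv bitv_le_one L
theorem val_replicate_zero (s : Nat) : val (List.replicate s 0) = 0 :=
  vF_replicate_zero bitv rfl s
theorem val_single (b : Int) : val [b] = bitv b := vF_single bitv b
theorem valp_cons (x : Int) (xs : List Int) : valp (x :: xs) = bitp x * 2 ^ xs.length + valp xs :=
  vF_cons bitp x xs
theorem valp_append (X Y : List Int) : valp (X ++ Y) = valp X * 2 ^ Y.length + valp Y :=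
  vF_append bitp X Y
theorem valp_lt (L : List Int) : valp L < 2 ^ L.length := vF_lt bitp bitp_le_one L
theorem valp_replicate_zero (s : Nat) : valp (List.replicate s 0) = 0 :=
  vF_replicate_zero bitp rfl s

-- delz facts
theorem delz_ne_nil (L : List Int) : delz L ≠ [] := by
  induction L with
  | nil => simp [delz]
  | cons x xs ih => simp only [delz]; split <;> simp [ih]

theorem delz_length_le (L : List Int) : (delz L).length ≤ L.length + 1 := by
  induction L with
  | nil => simp [delz]
  | cons x xs ih =>
    simp only [delz]
    split
    · have := ih; simp; omega
    · simp

theorem vF_delz (f : Int → Nat) (hf0 : f 0 = 0) (L : List Int) : valF f (delz L) = valF f L := by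
  induction L with
  | nil =>
    show valF f [0] = valF f []
    rw [vF_single, hf0]
    rfl
  | cons x xs ih =>
    simp only [delz]
    split
    · rw [ih, vF_cons]; subst ‹x = 0›; simp [hf0]
    · rfl

theorem val_delz (L : List Int) : val (delz L) = val L := vF_delz bitv rfl L
theorem valp_delz (L : List Int) : valp (delz L) = valp L := vF_delz bitp rfl L

theorem bits_delz (L : List Int) (h : Bits L) : Bits (delz L) := by
  induction L with
  | nil => intro x hx; simp [delz] at hx; simp [hx]
  | cons y xs ih =>
    simp only [delz]
    split
    · exact ih (fun x hx => h x (List.mem_cons_of_mem _ hx))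
    · exact h

theorem delz_shape (L : List Int) (h : Bits L) :
    delz L = [0] ∨ ∃ t, delz L = 1 :: t := by
  induction L with
  | nil => left; rfl
  | cons x xs ih =>
    simp only [delz]
    split
    · exact ih (fun y hy => h y (List.mem_cons_of_mem _ hy))
    · rcases h x List.mem_cons_self with h0 | h1
      · exact absurd h0 ‹¬ x = 0›
      · right; exact ⟨xs, by rw [h1]⟩

theorem delz_cons_one (t : List Int) : delz (1 :: t) = 1 :: t := by simp [delz]

theorem delz_eq_dropWhile (L : List Int) (h : L.dropWhile (fun x => x == 0) ≠ []) :
    delz L = L.dropWhile (fun x => x == 0) := by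
  induction L with
  | nil => exact absurd rfl h
  | cons x xs ih =>
    by_cases hx : x = 0
    · subst hx
      rw [List.dropWhile_cons_of_pos (by simp)] at h ⊢
      simp only [delz, if_pos rfl]
      exact ih h
    · rw [List.dropWhile_cons_of_neg (by simpa using hx)]
      simp only [delz, if_neg hx]



theorem blen_zero : blen 0 = 0 := by simp [blen]

theorem blen_bounds (p : Nat) (hp : p ≠ 0) : 2 ^ (blen p - 1) ≤ p ∧ p < 2 ^ blen p := by
  have h1 := PySem.Int.two_pow_bitLength_le (p : Int) (by exact_mod_cast hp)
  have h2 := PySem.Int.lt_two_pow_bitLength (p : Int)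
  simpa [blen, Int.natAbs_natCast] using ⟨h1, h2⟩

theorem blen_eq (p k : Nat) (h1 : 2 ^ (k-1) ≤ p) (h2 : p < 2 ^ k) (hk : 1 ≤ k) : blen p = k := by
  have hp : p ≠ 0 := by
    have : (1:Nat) ≤ 2 ^ (k-1) := Nat.one_le_two_pow
    omega
  obtain ⟨b1, b2⟩ := blen_bounds p hp
  by_contra hne
  rcases Nat.lt_or_ge (blen p) k with h | h
  · have : (2:Nat) ^ (blen p) ≤ 2 ^ (k-1) := Nat.pow_le_pow_right (by norm_num) (by omega)
    omega
  · have hk2 : k < blen p := by omega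
    have : (2:Nat) ^ k ≤ 2 ^ (blen p - 1) := Nat.pow_le_pow_right (by norm_num) (by omega)
    omega

theorem blen_le_of_lt (p m : Nat) (h : p < 2 ^ m) : blen p ≤ m := by
  rcases Nat.eq_zero_or_pos p with rfl | hp
  · simp [blen_zero]
  · obtain ⟨b1, b2⟩ := blen_bounds p (by omega)
    by_contra hc
    have : (2:Nat) ^ m ≤ 2 ^ (blen p - 1) := Nat.pow_le_pow_right (by norm_num) (by omega)
    omega

theorem blen_pos (p : Nat) (hp : p ≠ 0) : 1 ≤ blen p := by
  obtain ⟨b1, b2⟩ := blen_bounds p hp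
  by_contra hc
  have h0 : blen p = 0 := by omega
  rw [h0] at b2; omega

theorem or_disjoint (a x k : Nat) (h : x < 2 ^ k) : (a <<< k) ||| x = a * 2 ^ k + x := by
  rw [← Nat.shiftLeft_add_eq_or_of_lt h a, Nat.shiftLeft_eq]

theorem xor_split (a b x y k : Nat) (hx : x < 2 ^ k) (hy : y < 2 ^ k) :
    (a * 2 ^ k + x) ^^^ (b * 2 ^ k + y) = (a ^^^ b) * 2 ^ k + (x ^^^ y) := by
  have hxy : x ^^^ y < 2 ^ k := Nat.xor_lt_two_pow hx hy
  apply Nat.eq_of_testBit_eq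
  intro i
  rw [Nat.testBit_xor, mul_comm a, mul_comm b, mul_comm (a ^^^ b),
    Nat.testBit_two_pow_mul_add _ hx, Nat.testBit_two_pow_mul_add _ hy,
    Nat.testBit_two_pow_mul_add _ hxy]
  split
  · rw [Nat.testBit_xor]
  · rw [Nat.testBit_xor]

theorem testBit_top (p k : Nat) (h1 : 2 ^ (k-1) ≤ p) (h2 : p < 2 ^ k) (hk : 1 ≤ k) :
    p.testBit (k-1) = true := by
  have hr : p - 2 ^ (k-1) < 2 ^ (k-1) := by
    have : (2:Nat) ^ k = 2 ^ (k-1) * 2 := by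
      rw [← pow_succ]; congr 1; omega
    omega
  have hp : p = 2 ^ (k-1) * 1 + (p - 2 ^ (k-1)) := by omega
  rw [hp, Nat.testBit_two_pow_mul_add _ hr]
  simp

theorem lt_of_testBit_top_false (x k : Nat) (h1 : x < 2 ^ k) (hk : 1 ≤ k)
    (h2 : x.testBit (k-1) = false) : x < 2 ^ (k-1) := by
  have hpow : (0:Nat) < 2 ^ (k-1) := Nat.two_pow_pos _
  have hr : x % 2 ^ (k-1) < 2 ^ (k-1) := Nat.mod_lt _ hpow
  have hd : x = 2 ^ (k-1) * (x / 2 ^ (k-1)) + x % 2 ^ (k-1) := by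
    rw [Nat.div_add_mod]
  rw [hd, Nat.testBit_two_pow_mul_add _ hr] at h2
  rw [if_neg (lt_irrefl (k-1)), Nat.sub_self, Nat.testBit_zero] at h2
  have hm : x / 2 ^ (k-1) % 2 ≠ 1 := by simpa using h2
  have hdlt : x / 2 ^ (k-1) < 2 := by
    apply Nat.div_lt_of_lt_mul
    calc x < 2 ^ k := h1
      _ = 2 ^ (k-1) * 2 := by rw [← pow_succ]; congr 1; omega
  have hz : x / 2 ^ (k-1) = 0 := by
    generalize hq : x / 2 ^ (k-1) = q at hm hdlt
    omega
  rw [hz, Nat.mul_zero, Nat.zero_add] at hd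
  omega

theorem blen_xor_cancel (p n : Nat) (hp : p ≠ 0) (hn : n ≠ 0) (h : blen n ≤ blen p) :
    blen (p ^^^ (n <<< (blen p - blen n))) < blen p := by
  obtain ⟨p1, p2⟩ := blen_bounds p hp
  obtain ⟨n1, n2⟩ := blen_bounds n hn
  have hkp := blen_pos p hp
  have hkn := blen_pos n hn
  set k := blen p with hk
  set s := k - blen n with hs
  have hsh : n <<< s = n * 2 ^ s := Nat.shiftLeft_eq n s
  have hshlt : n <<< s < 2 ^ k := by
    rw [hsh]
    calc n * 2 ^ s < 2 ^ blen n * 2 ^ s := by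
          exact (Nat.mul_lt_mul_right (Nat.two_pow_pos _)).mpr n2
      _ = 2 ^ k := by rw [← pow_add]; congr 1; omega
  have hshge : 2 ^ (k-1) ≤ n <<< s := by
    rw [hsh]
    calc (2:Nat) ^ (k-1) = 2 ^ (blen n - 1) * 2 ^ s := by rw [← pow_add]; congr 1; omega
      _ ≤ n * 2 ^ s := Nat.mul_le_mul_right _ n1
  have htp := testBit_top p k p1 p2 hkp
  have htn := testBit_top (n <<< s) k hshge hshlt hkp
  have hxlt : p ^^^ (n <<< s) < 2 ^ k := Nat.xor_lt_two_pow p2 hshlt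
  have hxbit : (p ^^^ (n <<< s)).testBit (k-1) = false := by
    rw [Nat.testBit_xor, htp, htn]; rfl
  have := lt_of_testBit_top_false _ k hxlt hkp hxbit
  have hb := blen_le_of_lt _ _ this
  omega

-- packing agrees with the valuations
theorem or_bit (v b : Nat) (hb : b ≤ 1) : (v <<< 1) ||| b = 2 * v + b := by
  have h := or_disjoint v b 1 (by omega)
  simpa [Nat.mul_comm] using h

theorem packA_eq_val (L : List Int) : packA L = val L := by
  have main : ∀ (M : List Int) (v : Nat),
      M.foldl (fun v x => (v <<< 1) ||| (if x = 1 then 1 else 0)) v =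
      M.foldl (fun v x => 2*v + bitv x) v := by
    intro M
    induction M with
    | nil => intro v; rfl
    | cons x xs ih =>
      intro v
      simp only [List.foldl_cons]
      have hx : (if x = (1:Int) then (1:Nat) else 0) = bitv x := rfl
      rw [hx, or_bit v _ (bitv_le_one x)]
      exact ih _
  exact main L 0

theorem packB_eq_valp (L : List Int) : packB L = valp L := by
  have main : ∀ (M : List Int) (v : Nat),
      M.foldl (fun v x => (v <<< 1) ||| (PySem.Int.band x 1).toNat) v =
      M.foldl (fun v x => 2*v + bitp x) v := by
    intro M
    induction M with
    | nil => intro v; rfl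
    | cons x xs ih =>
      intro v
      simp only [List.foldl_cons]
      have hx : (PySem.Int.band x 1).toNat = bitp x := by
        rw [PySem.Int.band_one]; rfl
      rw [hx, or_bit v _ (bitp_le_one x)]
      exact ih _
  exact main L 0

theorem bitv_add_mod_gen (a n : Int) (ha : a = 0 ∨ a = 1) :
    bitv (PySem.Int.mod (a + n) 2) = bitv a ^^^ bitp n := by
  have e1 : PySem.Int.mod (a + n) 2 = (a + n) % 2 := PySem.Int.mod_eq_emod_of_pos (by norm_num)
  have e2 : PySem.Int.mod n 2 = n % 2 := PySem.Int.mod_eq_emod_of_pos (by norm_num)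
  unfold bitv bitp
  rw [e1, e2]
  have h2 : n % 2 = 0 ∨ n % 2 = 1 := Int.emod_two_eq n
  rcases ha with rfl | rfl <;> rcases h2 with h | h
  · have hz : (0 + n) % 2 = 0 := by omega
    rw [hz, h]
    simp
  · have hz : (0 + n) % 2 = 1 := by omega
    rw [hz, h]
    simp
  · have hz : (1 + n) % 2 = 1 := by omega
    rw [hz, h]
    simp
  · have hz : (1 + n) % 2 = 0 := by omega
    rw [hz, h]
    simp

theorem mod2_bits (a n : Int) : PySem.Int.mod (a + n) 2 = 0 ∨ PySem.Int.mod (a + n) 2 = 1 := by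
  have h1 := PySem.Int.mod_nonneg (a+n) (b := 2) (by norm_num)
  have h2 := PySem.Int.mod_lt (a+n) (b := 2) (by norm_num)
  omega

theorem bits_zip (L1 L2 : List Int) :
    Bits (List.zipWith (fun a n => PySem.Int.mod (a + n) 2) L1 L2) := by
  intro x hx
  rw [List.mem_iff_getElem] at hx
  obtain ⟨i, hlt, hi⟩ := hx
  rw [List.getElem_zipWith] at hi
  rw [← hi]
  exact mod2_bits _ _

theorem val_zip_xor (L1 : List Int) : ∀ (L2 : List Int), Bits L1 →
    L1.length = L2.length →
    val (List.zipWith (fun a n => PySem.Int.mod (a + n) 2) L1 L2) = val L1 ^^^ valp L2 := by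
  induction L1 with
  | nil =>
    intro L2 _ hl
    rw [List.length_nil] at hl
    rw [(List.length_eq_zero_iff).mp hl.symm]
    rfl
  | cons x xs ih =>
    intro L2 h1 hl
    cases L2 with
    | nil => simp at hl
    | cons y ys =>
      simp only [List.zipWith_cons_cons]
      rw [val_cons, val_cons, valp_cons]
      have hlen : (List.zipWith (fun a n => PySem.Int.mod (a + n) 2) xs ys).length = xs.length := by
        rw [List.length_zipWith]; simp at hl; omega
      have hys : ys.length = xs.length := by simp at hl; omega
      rw [hlen, hys]
      rw [ih ys (fun z hz => h1 z (List.mem_cons_of_mem _ hz)) (by omega)]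
      rw [bitv_add_mod_gen x y (h1 x List.mem_cons_self)]
      exact (xor_split (bitv x) (bitp y) (val xs) (valp ys) xs.length (val_lt xs)
        (hys ▸ valp_lt ys)).symm

-- bit length of canonical lists, makeEq, the multiply loop
theorem blen_canonF (f : Int → Nat) (hf1 : ∀ x, f x ≤ 1) (x : Int) (t : List Int)
    (hx : f x = 1) : blen (valF f (x :: t)) = t.length + 1 := by
  rw [vF_cons, hx, one_mul]
  apply blen_eq
  · rw [Nat.add_sub_cancel]
    exact Nat.le_add_right _ _
  · have := vF_lt f hf1 t
    rw [pow_succ]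
    omega
  · omega

theorem blen_val_canon (t : List Int) : blen (val (1 :: t)) = t.length + 1 :=
  blen_canonF bitv bitv_le_one 1 t rfl

theorem vF_cons_pos (f : Int → Nat) (x : Int) (t : List Int) (hx : f x = 1) :
    valF f (x :: t) ≠ 0 := by
  rw [vF_cons, hx, one_mul]
  have := Nat.two_pow_pos t.length
  omega

theorem val_cons_one_pos (t : List Int) : val (1 :: t) ≠ 0 := vF_cons_pos bitv 1 t rfl

theorem makeEq_eq (A B : List Int) (h : A.length = B.length) : makeEq A B = (A, B) := by
  simp [makeEq, h]

theorem makeEq_spec (f : Int → Nat) (hf0 : f 0 = 0) (A B : List Int) :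
    (makeEq A B).1.length = max A.length B.length ∧
    (makeEq A B).2.length = max A.length B.length ∧
    valF f (makeEq A B).1 = valF f A ∧ valF f (makeEq A B).2 = valF f B := by
  rcases Nat.lt_or_ge A.length B.length with h | h
  · have e1 : makeEq A B = (List.replicate (B.length - A.length) 0 ++ A, B) := by
      unfold makeEq
      simp only [if_pos h]
      have hc : ¬ ((List.replicate (B.length - A.length) 0 ++ A).length > B.length) := by
        rw [List.length_append, List.length_replicate]; omega
      simp only [if_neg hc]
    rw [e1]
    refine ⟨?_, by simp; omega, vF_pad f hf0 _ _, rfl⟩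
    rw [List.length_append, List.length_replicate]; omega
  · rcases Nat.lt_or_ge B.length A.length with h2 | h2
    · have e1 : makeEq A B = (A, List.replicate (A.length - B.length) 0 ++ B) := by
        unfold makeEq
        simp only [if_neg (Nat.not_lt.mpr h), if_pos h2]
      rw [e1]
      refine ⟨by simp; omega, ?_, rfl, vF_pad f hf0 _ _⟩
      rw [List.length_append, List.length_replicate]; omega
    · have he : A.length = B.length := by omega
      rw [makeEq_eq A B he]
      exact ⟨by simp; omega, by simp; omega, rfl, rfl⟩

theorem mulLoopB_zero (b p : Nat) : mulLoopB 0 b p = p := by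
  conv_lhs => rw [mulLoopB]
  simp

theorem mulLoopB_step (a b p : Nat) (h : a ≠ 0) :
    mulLoopB a b p = mulLoopB (a >>> 1) (b <<< 1) (if a &&& 1 = 1 then p ^^^ b else p) := by
  conv_lhs => rw [mulLoopB]
  rw [if_neg h]

theorem mulLoopB_acc (a : Nat) : ∀ (b p : Nat), mulLoopB a b p = p ^^^ mulLoopB a b 0 := by
  induction a using Nat.strong_induction_on with
  | _ a ih =>
    intro b p
    rcases Nat.eq_zero_or_pos a with rfl | ha
    · rw [mulLoopB_zero, mulLoopB_zero]; simp
    · have hne : a ≠ 0 := by omega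
      have hlt : a >>> 1 < a := by
        simpa [Nat.shiftRight_succ, Nat.shiftRight_zero] using Nat.div_lt_self ha one_lt_two
      rw [mulLoopB_step a b p hne, mulLoopB_step a b 0 hne,
          ih _ hlt (b <<< 1) (if a &&& 1 = 1 then p ^^^ b else p),
          ih _ hlt (b <<< 1) (if a &&& 1 = 1 then 0 ^^^ b else 0)]
      split
      · rw [Nat.zero_xor, Nat.xor_assoc]
      · rw [Nat.zero_xor]

-- set_xor and the inner loop
theorem two_mul_xor_bit (a b : Nat) (hb : b ≤ 1) : (2 * a) ^^^ b = 2 * a + b := by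
  have h := xor_split a 0 0 b 1 (by omega) (by omega)
  simpa [Nat.mul_comm] using h

theorem xor_mul_distrib (u v w : Nat) : (u ^^^ v) * 2 ^ w = (u * 2 ^ w) ^^^ (v * 2 ^ w) := by
  have h := xor_split u v 0 0 w (Nat.two_pow_pos _) (Nat.two_pow_pos _)
  simpa using h.symm

theorem set_xor (r : List Int) : ∀ (pos : Nat), Bits r → ∀ (b : Int),
    pos < r.length →
    val (r.set pos (PySem.Int.mod (r.getD pos 0 + b) 2)) =
      val r ^^^ (bitp b) * 2 ^ (r.length - 1 - pos) := by
  induction r with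
  | nil => intro pos _ b h; simp at h
  | cons x xs ih =>
    intro pos hr b hpos
    cases pos with
    | zero =>
      simp only [List.set_cons_zero, List.getD_cons_zero, List.length_cons,
        Nat.add_sub_cancel, Nat.sub_zero]
      rw [val_cons, val_cons]
      rw [bitv_add_mod_gen x b (hr x List.mem_cons_self)]
      have h := xor_split (bitv x) (bitp b) (val xs) 0 xs.length (val_lt xs)
        (Nat.two_pow_pos _)
      simp only [Nat.add_zero, Nat.xor_zero] at h
      exact h.symm
    | succ p =>
      simp only [List.set_cons_succ, List.getD_cons_succ, List.length_cons]
      rw [val_cons, val_cons, List.length_set]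
      have hps : p < xs.length := by simp at hpos; omega
      rw [ih p (fun z hz => hr z (List.mem_cons_of_mem _ hz)) b hps]
      have he : xs.length + 1 - 1 - (p + 1) = xs.length - 1 - p := by omega
      rw [he]
      have hlt : bitp b * 2 ^ (xs.length - 1 - p) < 2 ^ xs.length := by
        calc bitp b * 2 ^ (xs.length - 1 - p) ≤ 1 * 2 ^ (xs.length - 1 - p) :=
              Nat.mul_le_mul_right _ (bitp_le_one b)
          _ = 2 ^ (xs.length - 1 - p) := by ring
          _ < 2 ^ xs.length := Nat.pow_lt_pow_right (by norm_num) (by omega)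
      have h := xor_split (bitv x) 0 (val xs) (bitp b * 2 ^ (xs.length - 1 - p))
        xs.length (val_lt xs) hlt
      simpa using h.symm

theorem bits_set (r : List Int) (pos : Nat) (v : Int) (hr : Bits r) (hv : v = 0 ∨ v = 1) :
    Bits (r.set pos v) := by
  intro x hx
  rcases List.mem_or_eq_of_mem_set hx with h | h
  · exact hr x h
  · rw [h]; exact hv

theorem innerLoop_spec (B : List Int) : ∀ (i : Nat) (r : List Int), Bits r →
    i + B.length ≤ r.length →
    val (innerLoop B i r) = val r ^^^ (valp B) * 2 ^ (r.length - i - B.length) ∧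
    Bits (innerLoop B i r) ∧ (innerLoop B i r).length = r.length := by
  induction B using List.reverseRecOn with
  | nil =>
    intro i r hr _
    refine ⟨?_, hr, rfl⟩
    show val r = val r ^^^ valp ([] : List Int) * 2 ^ (r.length - i - 0)
    simp [valp, valF]
  | append_singleton Bs b ih =>
    intro i r hr hw
    have hlen : (Bs ++ [b]).length = Bs.length + 1 := by simp
    have hstep : innerLoop (Bs ++ [b]) i r =
        (innerLoop Bs i r).set (i + Bs.length)
          (PySem.Int.mod ((innerLoop Bs i r).getD (i + Bs.length) 0 + b) 2) := by
      unfold innerLoop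
      rw [hlen, List.range_succ, List.foldl_append, List.foldl_cons, List.foldl_nil]
      have hcong : (List.range Bs.length).foldl
          (fun r j => r.set (i+j) (PySem.Int.mod (r.getD (i+j) 0 + (Bs ++ [b]).getD j 0) 2)) r =
          (List.range Bs.length).foldl
          (fun r j => r.set (i+j) (PySem.Int.mod (r.getD (i+j) 0 + Bs.getD j 0) 2)) r := by
        apply PySem.List.foldl_congr_mem
        intro acc j hj
        rw [List.getD_append _ _ _ _ (List.mem_range.mp hj)]
      rw [hcong]
      have hb' : (Bs ++ [b]).getD Bs.length 0 = b := by
        rw [List.getD_append_right _ _ _ _ (le_refl _)]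
        simp
      rw [hb']
    obtain ⟨hv, hbits, hlenr⟩ := ih i r hr (by rw [hlen] at hw; omega)
    rw [hlen] at hw
    have hpos : i + Bs.length < (innerLoop Bs i r).length := by omega
    constructor
    · rw [hstep, set_xor _ _ hbits b hpos, hv, hlenr]
      have hw1 : (Bs ++ [b]).length = Bs.length + 1 := hlen
      rw [hw1]
      set w := r.length - 1 - (i + Bs.length) with hwdef
      have h1 : r.length - i - Bs.length = w + 1 := by omega
      have h2 : r.length - i - (Bs.length + 1) = w := by omega
      rw [h1, h2]
      have hvB : valp (Bs ++ [b]) = 2 * valp Bs + bitp b := by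
        rw [valp_append]
        show valp Bs * 2 ^ [b].length + valF bitp [b] = _
        rw [vF_single]
        simp
        ring
      rw [hvB, ← two_mul_xor_bit (valp Bs) (bitp b) (bitp_le_one b), xor_mul_distrib]
      have h3 : 2 * valp Bs * 2 ^ w = valp Bs * 2 ^ (w + 1) := by ring
      rw [h3, Nat.xor_assoc]
    · constructor
      · rw [hstep]
        exact bits_set _ _ _ hbits (mod2_bits _ _)
      · rw [hstep, List.length_set, hlenr]

-- outer multiplication loop
def sAcc (A2 : List Int) (bv : Nat) : Nat :=
  (List.range A2.length).foldl
    (fun acc i => if A2.getD i 0 = 1 then acc ^^^ bv * 2 ^ (A2.length - 1 - i) else acc) 0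

theorem bits_replicate (s : Nat) : Bits (List.replicate s (0:Int)) := by
  intro x hx; left; exact List.eq_of_mem_replicate hx

theorem outer_prefix (A2 B2 : List Int)
    (hlen : B2.length = A2.length) (hm1 : 1 ≤ A2.length) :
    ∀ q, q ≤ A2.length →
    val ((List.range q).foldl
        (fun r i => if A2.getD i 0 = 1 then innerLoop B2 i r else r)
        (List.replicate (2*A2.length-1) 0)) =
      (List.range q).foldl
        (fun acc i => if A2.getD i 0 = 1 then acc ^^^ (valp B2) * 2 ^ (A2.length - 1 - i) else acc) 0 ∧
    Bits ((List.range q).foldl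
        (fun r i => if A2.getD i 0 = 1 then innerLoop B2 i r else r)
        (List.replicate (2*A2.length-1) 0)) ∧
    ((List.range q).foldl
        (fun r i => if A2.getD i 0 = 1 then innerLoop B2 i r else r)
        (List.replicate (2*A2.length-1) 0)).length = 2*A2.length-1 := by
  intro q
  induction q with
  | zero =>
    intro _
    exact ⟨val_replicate_zero _, bits_replicate _, by simp⟩
  | succ k ih =>
    intro hq
    obtain ⟨hv, hbits, hl⟩ := ih (by omega)
    rw [List.range_succ, List.foldl_append, List.foldl_append, List.foldl_cons,
      List.foldl_cons, List.foldl_nil, List.foldl_nil]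
    set prev := (List.range k).foldl
        (fun r i => if A2.getD i 0 = 1 then innerLoop B2 i r else r)
        (List.replicate (2*A2.length-1) 0) with hprev
    by_cases hbit : A2.getD k 0 = 1
    · rw [if_pos hbit, if_pos hbit]
      have hwin : k + B2.length ≤ prev.length := by rw [hl, hlen]; omega
      obtain ⟨iv, ibits, ilen⟩ := innerLoop_spec B2 k prev hbits hwin
      refine ⟨?_, ibits, by rw [ilen, hl]⟩
      rw [iv, hv, hl, hlen]
      have he : 2*A2.length-1 - k - A2.length = A2.length - 1 - k := by omega
      rw [he]
    · rw [if_neg hbit, if_neg hbit]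
      exact ⟨hv, hbits, hl⟩

theorem sAcc_nil (bv : Nat) : sAcc [] bv = 0 := rfl

theorem sAcc_eq_mul (A2 : List Int) : ∀ bv, sAcc A2 bv = mulLoopB (val A2) bv 0 := by
  induction A2 using List.reverseRecOn with
  | nil =>
    intro bv
    have hv0 : val ([] : List Int) = 0 := rfl
    rw [sAcc_nil, hv0, mulLoopB_zero]
  | append_singleton ys y ih =>
    intro bv
    have hstep : sAcc (ys ++ [y]) bv =
        (if y = 1 then sAcc ys (2*bv) ^^^ bv else sAcc ys (2*bv)) := by
      unfold sAcc
      have hL : (ys ++ [y]).length = ys.length + 1 := by simp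
      rw [hL, List.range_succ, List.foldl_append, List.foldl_cons, List.foldl_nil]
      have hcong : (List.range ys.length).foldl
          (fun acc i => if (ys ++ [y]).getD i 0 = 1 then acc ^^^ bv * 2 ^ (ys.length + 1 - 1 - i) else acc) 0 =
          (List.range ys.length).foldl
          (fun acc i => if ys.getD i 0 = 1 then acc ^^^ (2*bv) * 2 ^ (ys.length - 1 - i) else acc) 0 := by
        apply PySem.List.foldl_congr_mem
        intro acc i hi
        have hilt : i < ys.length := List.mem_range.mp hi
        rw [List.getD_append _ _ _ _ hilt]
        have he : (2*bv) * 2 ^ (ys.length - 1 - i) = bv * 2 ^ (ys.length + 1 - 1 - i) := by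
          have : ys.length + 1 - 1 - i = (ys.length - 1 - i) + 1 := by omega
          rw [this, pow_succ]; ring
        rw [he]
      rw [hcong]
      have hgy : (ys ++ [y]).getD ys.length 0 = y := by
        rw [List.getD_append_right _ _ _ _ (le_refl _)]; simp
      rw [hgy]
      have hsub : ys.length + 1 - 1 - ys.length = 0 := by omega
      rw [hsub, pow_zero, Nat.mul_one]
    rw [hstep]
    have hval : val (ys ++ [y]) = 2 * val ys + bitv y := by
      rw [val_append]
      show val ys * 2 ^ [y].length + valF bitv [y] = _
      rw [vF_single]
      simp
      ring
    rw [hval, ih (2*bv)]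
    by_cases hy : y = 1
    · subst hy
      have hb : bitv (1:Int) = 1 := rfl
      rw [hb, if_pos rfl]
      have hne : 2 * val ys + 1 ≠ 0 := by omega
      rw [mulLoopB_step _ _ _ hne]
      have e1 : (2 * val ys + 1) >>> 1 = val ys := by
        rw [Nat.shiftRight_eq_div_pow, pow_one]; omega
      have e2 : (2 * val ys + 1) &&& 1 = 1 := by
        rw [Nat.and_one_is_mod]; omega
      rw [e1, e2, if_pos rfl, Nat.zero_xor]
      rw [mulLoopB_acc (val ys) (bv <<< 1) bv, Nat.shiftLeft_eq]
      have : bv * 2 = 2 * bv := by ring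
      rw [this, Nat.xor_comm]
    · have hb : bitv y = 0 := by unfold bitv; rw [if_neg hy]
      rw [hb, Nat.add_zero, if_neg hy]
      rcases Nat.eq_zero_or_pos (val ys) with hz | hpos
      · rw [hz]; norm_num [mulLoopB_zero]
      · have hne : 2 * val ys ≠ 0 := by omega
        rw [mulLoopB_step _ _ _ hne]
        have e1 : (2 * val ys) >>> 1 = val ys := by
          rw [Nat.shiftRight_eq_div_pow, pow_one]; omega
        have e2 : (2 * val ys) &&& 1 = 0 := by
          rw [Nat.and_one_is_mod]; omega
        rw [e1, e2]
        rw [if_neg (by norm_num), Nat.shiftLeft_eq]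
        congr 1
        ring

-- reduction correspondence
theorem delz_idem (L : List Int) : delz (delz L) = delz L := by
  induction L with
  | nil => rfl
  | cons x xs ih =>
    by_cases h : x = 0
    · simp only [delz, if_pos h]; exact ih
    · simp only [delz, if_neg h]

theorem delz_pos_len (L : List Int) : 1 ≤ (delz L).length := by
  have := delz_ne_nil L
  cases h : delz L with
  | nil => exact absurd h this
  | cons a t => simp

theorem redLoopB_zero (fuel n : Nat) (h : 1 ≤ blen n) : redLoopB fuel 0 n = 0 := by
  cases fuel with
  | zero => rfl
  | succ f =>
    simp only [redLoopB, blen_zero]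
    rw [if_neg]
    rintro ⟨hn, hle⟩
    omega

theorem red_spec : ∀ (fuel1 fuel2 : Nat) (A N : List Int), Bits A →
    2 ≤ (delz N).length → (∃ n0 t, delz N = n0 :: t ∧ bitp n0 = 1) →
    (delz A).length ≤ fuel1 → blen (val A) ≤ fuel2 →
    val (galueModuleF fuel1 A N) = redLoopB fuel2 (val A) (valp N) ∧
    (galueModuleF fuel1 A N = [0] ∨ ∃ t, galueModuleF fuel1 A N = 1 :: t) ∧
    Bits (galueModuleF fuel1 A N) := by
  intro fuel1
  induction fuel1 with
  | zero =>
    intro fuel2 A N _ _ _ hf _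
    exact absurd hf (by have := delz_pos_len A; omega)
  | succ f ih =>
    intro fuel2 A N hA h2 hh hf1 hf2
    obtain ⟨n0, tN, hd, hodd⟩ := hh
    have hvalN : valp N = valp (n0 :: tN) := by rw [← hd, valp_delz]
    have hblenN : blen (valp N) = tN.length + 1 := by
      rw [hvalN]
      exact blen_canonF bitp bitp_le_one n0 tN hodd
    have hlnN : (delz N).length = tN.length + 1 := by rw [hd]; simp
    have hln2 : 2 ≤ tN.length + 1 := by omega
    rcases delz_shape A hA with hA0 | ⟨tA, hA1⟩
    · -- stripped A is [0]
      have hvA : val A = 0 := by rw [← val_delz, hA0]; rfl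
      have hlhs : galueModuleF (f+1) A N = [0] := by
        simp only [galueModuleF]
        rw [hA0, hd]
        rw [if_pos (by simp; omega)]
      rw [hlhs, hvA, redLoopB_zero fuel2 (valp N) (by omega)]
      exact ⟨rfl, Or.inl rfl, by intro x hx; simp at hx; simp [hx]⟩
    · -- stripped A starts with 1
      have hvA : val A = val (1 :: tA) := by rw [← hA1, val_delz]
      have hblenA : blen (val A) = tA.length + 1 := by rw [hvA, blen_val_canon]
      have hlaA : (delz A).length = tA.length + 1 := by rw [hA1]; simp
      by_cases hlt : (delz A).length < (delz N).length
      · have hlhs : galueModuleF (f+1) A N = delz A := by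
          simp only [galueModuleF]
          rw [if_pos hlt]
        have hcond : ¬ (blen (valp N) ≤ blen (val A)) := by omega
        have hrhs : redLoopB fuel2 (val A) (valp N) = val A := by
          cases fuel2 with
          | zero => rfl
          | succ f2 =>
            simp only [redLoopB]
            rw [if_neg (fun h => hcond h.2)]
        rw [hlhs, hrhs, val_delz]
        exact ⟨rfl, Or.inr ⟨tA, hA1⟩, bits_delz A hA⟩
      · -- reduction step
        have hge : (delz N).length ≤ (delz A).length := by omega
        set s := (delz A).length - (delz N).length with hs
        set Nsh := delz N ++ List.replicate s 0 with hNsh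
        have hNshlen : Nsh.length = (delz A).length := by
          rw [hNsh, List.length_append, List.length_replicate]; omega
        have hme : makeEq (delz A) Nsh = (delz A, Nsh) := makeEq_eq _ _ hNshlen.symm
        set A2 := List.zipWith (fun a n => PySem.Int.mod (a + n) 2) (delz A) Nsh with hA2
        have hlhs : galueModuleF (f+1) A N = galueModuleF f (delz A2) (delz N) := by
          simp only [galueModuleF]
          rw [if_neg hlt, hme]
        have hvNsh : valp Nsh = valp N * 2 ^ s := by
          rw [hNsh, valp_append, valp_replicate_zero, List.length_replicate, valp_delz]
          omega
        have hvA2 : val A2 = val A ^^^ (valp N <<< (blen (val A) - blen (valp N))) := by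
          rw [hA2, val_zip_xor (delz A) Nsh (bits_delz A hA) hNshlen.symm,
            val_delz, hvNsh, Nat.shiftLeft_eq]
          have : s = blen (val A) - blen (valp N) := by omega
          rw [this]
        have hAne : val A ≠ 0 := by rw [hvA]; exact val_cons_one_pos tA
        have hNne : valp N ≠ 0 := by
          rw [hvalN]
          exact vF_cons_pos bitp n0 tN hodd
        have hcan : blen (val A2) < blen (val A) := by
          rw [hvA2]
          exact blen_xor_cancel (val A) (valp N) hAne hNne (by omega)
        obtain ⟨f2, rfl⟩ : ∃ f2, fuel2 = f2 + 1 := by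
          cases fuel2 with
          | zero => exact absurd hf2 (by omega)
          | succ f2 => exact ⟨f2, rfl⟩
        have hrhs : redLoopB (f2+1) (val A) (valp N) =
            redLoopB f2 (val A ^^^ (valp N <<< (blen (val A) - blen (valp N)))) (valp N) := by
          simp only [redLoopB]
          rw [if_pos ⟨hNne, by omega⟩]
        have hBitsA2 : Bits A2 := bits_zip _ _
        have hlenA2 : (delz A2).length ≤ f := by
          rcases delz_shape A2 hBitsA2 with h0 | ⟨t2, h1⟩
          · rw [h0]; simp; omega
          · have : blen (val A2) = t2.length + 1 := by
              rw [← val_delz A2, h1, blen_val_canon]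
            rw [h1]; simp; omega
        have hidem : (delz (delz A2)).length ≤ f := by rw [delz_idem]; exact hlenA2
        have ihres := ih f2 (delz A2) (delz N) (bits_delz A2 hBitsA2)
          (by rw [delz_idem]; omega) (by rw [delz_idem]; exact ⟨n0, tN, hd, hodd⟩)
          hidem (by rw [val_delz]; omega)
        obtain ⟨ihv, ihshape, ihbits⟩ := ihres
        refine ⟨?_, by rw [hlhs]; exact ihshape, by rw [hlhs]; exact ihbits⟩
        rw [hlhs, ihv, val_delz, hvA2, hrhs, valp_delz]

-- bit extraction and reconstruction of the list from the packed value
theorem val_bit (L : List Int) (j : Nat) (hj : j < L.length) :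
    (val L >>> (L.length - 1 - j)) &&& 1 = bitv (L[j]) := by
  set k := L.length - 1 - j with hk
  have hdl : (L.drop (j+1)).length = L.length - (j+1) := List.length_drop
  have hsplit : val L = val (L.take (j+1)) * 2 ^ k + val (L.drop (j+1)) := by
    conv_lhs => rw [← List.take_append_drop (j+1) L]
    rw [val_append, hdl]
    have he2 : L.length - (j+1) = k := by omega
    rw [he2]
  have hvd : val (L.drop (j+1)) < 2 ^ k := by
    have := val_lt (L.drop (j+1))
    rw [hdl] at this
    calc val (L.drop (j+1)) < 2 ^ (L.length - (j+1)) := this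
      _ ≤ 2 ^ k := Nat.pow_le_pow_right (by norm_num) (by omega)
  have hdiv : val L >>> k = val (L.take (j+1)) := by
    rw [Nat.shiftRight_eq_div_pow, hsplit, mul_comm,
      Nat.mul_add_div (Nat.two_pow_pos k), Nat.div_eq_of_lt hvd]
    omega
  have htake : val (L.take (j+1)) = 2 * val (L.take j) + bitv (L[j]) := by
    rw [List.take_add_one, List.getElem?_eq_getElem hj]
    show val (L.take j ++ [L[j]]) = _
    rw [val_append, val_single]
    simp
    ring
  rw [hdiv, Nat.and_one_is_mod, htake]
  have := bitv_le_one (L[j])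
  omega

theorem toBits_val (L : List Int) (h : Bits L) (hc : L = [0] ∨ ∃ t, L = 1 :: t) :
    (if val L = 0 then ([0] : List Int)
     else (List.range (blen (val L))).reverse.map
       (fun k => (((val L >>> k) &&& 1 : Nat) : Int))) = L := by
  rcases hc with rfl | ⟨t, rfl⟩
  · have h0 : val [(0:Int)] = 0 := rfl
    rw [h0]
    simp
  · rw [if_neg (val_cons_one_pos t)]
    have hbl : blen (val (1 :: t)) = t.length + 1 := blen_val_canon t
    have hn : blen (val (1 :: t)) = (1 :: t).length := by rw [hbl]; simp
    apply List.ext_getElem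
    · simp [hn]
    · intro j hj1 hj2
      rw [List.getElem_map, List.getElem_reverse, List.getElem_range]
      rw [List.length_range]
      have hjlt : j < (1 :: t).length := hj2
      have hkey := val_bit (1 :: t) j hjlt
      have he : blen (val (1 :: t)) - 1 - j = (1 :: t).length - 1 - j := by rw [hn]
      rw [he, hkey]
      rcases h ((1 :: t)[j]) (List.getElem_mem hjlt) with h0 | h0
      · rw [h0]; rfl
      · rw [h0]; rfl

-- bridge from Pre_ to the shape of the stripped modulus
theorem pre_delz (N : List Int) (h2 : 2 ≤ (N.dropWhile (fun x => x == 0)).length)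
    (hodd : PySem.Int.mod ((N.dropWhile (fun x => x == 0)).headD 0) 2 = 1) :
    2 ≤ (delz N).length ∧ ∃ n0 t, delz N = n0 :: t ∧ bitp n0 = 1 := by
  have hne : N.dropWhile (fun x => x == 0) ≠ [] := by
    intro h
    rw [h] at h2
    simp at h2
  have hd := delz_eq_dropWhile N hne
  cases hM : N.dropWhile (fun x => x == 0) with
  | nil => exact absurd hM hne
  | cons n0 t =>
    rw [hM] at hd h2 hodd
    simp only [List.headD_cons] at hodd
    refine ⟨by rw [hd]; simpa using h2, n0, t, hd, ?_⟩
    unfold bitp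
    rw [hodd]
    rfl



-- zero-product path
theorem vF_zero (f : Int → Nat) (L : List Int) (h : ∀ x ∈ L, f x = 0) : valF f L = 0 := by
  induction L with
  | nil => rfl
  | cons x xs ih =>
    rw [vF_cons, h x List.mem_cons_self, ih (fun z hz => h z (List.mem_cons_of_mem _ hz))]
    simp

theorem mulLoopB_b0 (a : Nat) : ∀ p, mulLoopB a 0 p = p := by
  induction a using Nat.strong_induction_on with
  | _ a ih =>
    intro p
    rcases Nat.eq_zero_or_pos a with rfl | ha
    · exact mulLoopB_zero 0 p
    · have hne : a ≠ 0 := by omega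
      have hlt : a >>> 1 < a := by
        simpa [Nat.shiftRight_succ, Nat.shiftRight_zero] using Nat.div_lt_self ha one_lt_two
      rw [mulLoopB_step a 0 p hne]
      have h0 : (0:Nat) <<< 1 = 0 := rfl
      rw [h0, ih _ hlt]
      split <;> simp

theorem gmod_zero (fuel : Nat) (R N : List Int) (hR : delz R = [0])
    (hN : 2 ≤ (delz N).length) : galueModuleF (fuel+1) R N = [0] := by
  simp only [galueModuleF]
  rw [hR, if_pos (by simp; omega)]

theorem pre_delz_len (N : List Int) (h2 : 2 ≤ (N.dropWhile (fun x => x == 0)).length) :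
    2 ≤ (delz N).length := by
  have hne : N.dropWhile (fun x => x == 0) ≠ [] := by
    intro h
    rw [h] at h2
    simp at h2
  rw [delz_eq_dropWhile N hne]
  exact h2

theorem red_p0 (n : Nat) : redLoopB (blen 0 + 1) 0 n = 0 := by
  simp only [redLoopB]
  rw [if_neg]
  rintro ⟨hn, hle⟩
  have := blen_pos n hn
  rw [blen_zero] at hle
  omega

-- ===== VERDICT (by name: the statement is the Claim_ definition above) =====
theorem galueMultiply_spec : Claim_equal_galueMultiply := by
  intro A B N _ hPre
  obtain ⟨hpre2, hpreodd⟩ := hPre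
  unfold Spec_galueMultiply
  simp only [galueMultiply, galueMultiply_alt]
  obtain ⟨lp1, lp2, vp1, vp2⟩ := makeEq_spec bitv rfl (delz A) (delz B)
  obtain ⟨_, _, wp1, wp2⟩ := makeEq_spec bitp rfl (delz A) (delz B)
  have hm1 : 1 ≤ (makeEq (delz A) (delz B)).1.length := by
    rw [lp1]
    have := delz_pos_len A
    omega
  have hlen : (makeEq (delz A) (delz B)).2.length = (makeEq (delz A) (delz B)).1.length := by
    rw [lp1, lp2]
  obtain ⟨hv, hbits, hlenr⟩ := outer_prefix (makeEq (delz A) (delz B)).1 (makeEq (delz A) (delz B)).2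
    hlen hm1 (makeEq (delz A) (delz B)).1.length (le_refl _)
  set R := (List.range (makeEq (delz A) (delz B)).1.length).foldl
      (fun r i => if (makeEq (delz A) (delz B)).1.getD i 0 = 1
        then innerLoop (makeEq (delz A) (delz B)).2 i r else r)
      (List.replicate (2 * (makeEq (delz A) (delz B)).1.length - 1) 0) with hR
  have hvR : val R = mulLoopB (val (makeEq (delz A) (delz B)).1) (valp (makeEq (delz A) (delz B)).2) 0 := by
    rw [hv]
    exact sAcc_eq_mul (makeEq (delz A) (delz B)).1 (valp (makeEq (delz A) (delz B)).2)
  have hv1 : val (makeEq (delz A) (delz B)).1 = val (delz A) := vp1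
  have hw2 : valp (makeEq (delz A) (delz B)).2 = valp (delz B) := wp2
  have hpA : packA A = val (makeEq (delz A) (delz B)).1 := by
    rw [packA_eq_val A, hv1, val_delz]
  have hpB : packB B = valp (makeEq (delz A) (delz B)).2 := by
    rw [packB_eq_valp B, hw2, valp_delz]
  have hpN : packB N = valp N := packB_eq_valp N
  rw [hpA, hpB, hpN, ← hvR]
  show delz (galueModuleF (R.length + 1) R N) = _
  rcases hpreodd with hodd | hzA | hzB
  · -- odd leading coefficient of the stripped modulus: the proper reduction path
    obtain ⟨hdeg2, hdhead⟩ := pre_delz N hpre2 hodd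
    obtain ⟨rv, rshape, rbits⟩ := red_spec (R.length+1) (blen (val R)+1) R N hbits
      hdeg2 hdhead (delz_length_le R) (Nat.le_succ _)
    have hdelzG : delz (galueModuleF (R.length+1) R N) = galueModuleF (R.length+1) R N := by
      rcases rshape with h0 | ⟨t, h1⟩
      · rw [h0]
        rfl
      · rw [h1, delz_cons_one]
    rw [hdelzG, ← rv]
    exact (toBits_val (galueModuleF (R.length+1) R N) rbits rshape).symm
  · -- no entry of A is exactly 1: the product is 0 and both sides return [0]
    have hv0 : val R = 0 := by
      have hvz1 : val (makeEq (delz A) (delz B)).1 = 0 := by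
        rw [← hpA, packA_eq_val]
        exact vF_zero bitv A (fun x hx => by unfold bitv; rw [if_neg (hzA x hx)])
      rw [hvR, hvz1, mulLoopB_zero]
    have hdelzR0 : delz R = [0] := by
      rcases delz_shape R hbits with h0 | ⟨t, h1⟩
      · exact h0
      · exfalso
        have : val R ≠ 0 := by
          rw [← val_delz R, h1]
          exact val_cons_one_pos t
        exact this hv0
    rw [gmod_zero R.length R N hdelzR0 (pre_delz_len N hpre2), hv0, red_p0]
    rfl
  · -- every entry of B is even: the product is 0 and both sides return [0]
    have hv0 : val R = 0 := by
      have hvz2 : valp (makeEq (delz A) (delz B)).2 = 0 := by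
        rw [← hpB, packB_eq_valp]
        exact vF_zero bitp B (fun x hx => by unfold bitp; rw [hzB x hx]; rfl)
      rw [hvR, hvz2, mulLoopB_b0]
    have hdelzR0 : delz R = [0] := by
      rcases delz_shape R hbits with h0 | ⟨t, h1⟩
      · exact h0
      · exfalso
        have : val R ≠ 0 := by
          rw [← val_delz R, h1]
          exact val_cons_one_pos t
        exact this hv0
    rw [gmod_zero R.length R N hdelzR0 (pre_delz_len N hpre2), hv0, red_p0]
    rfl
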